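-- pv_equiv track=rewrite | github.com/vbmchik/pythin | day31/solver.py | indexOfCharacter
-- ===== SOURCE A (Python) =====
-- def indexOfCharacter(symbol, pattern, fromBegin=False):
--     index = -1
--     flag=0
--     symbols= list(pattern)
--     for i in range(len(symbols)):
--         if symbols[i]=='(' :
--             flag+=1
--         if symbols[i]==')' :
--             flag-=1
--         if symbols[i] == symbol and flag == 0:
--             if fromBegin:
--                 return i
--             else:
--                 index = i
--     return index
-- ===== SOURCE B (Python) =====
-- def indexOfCharacter(symbol, pattern, fromBegin=False):
--     # Reverse scan: depth-after-i == 0  iff  the balance of chars strictly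
--     # right of i equals the total balance of the whole pattern.
--     total = sum(1 if c == '(' else -1 if c == ')' else 0 for c in pattern)
--     suffix = 0  # balance of the characters strictly to the right of i
--     index = -1
--     for i in range(len(pattern) - 1, -1, -1):
--         c = pattern[i]
--         if c == symbol and suffix == total:
--             if not fromBegin:
--                 return i          # first hit in reverse order = last match
--             index = i             # keep going left; ends at the first match
--         if c == '(':
--             suffix += 1
--         elif c == ')':
--             suffix -= 1
--     return index
-- ===== Notes on version B (the rewrite author's own statement) =====
-- stated objective: alternative
-- what changed: A scans left-to-right with a running depth and remembers the last match; B first computes the total paren balance, then scans the pattern right-to-left with a suffix balance (match iff suffix == total, i.e. depth after i is 0), so the not-fromBegin case early-returns and the fromBegin case accumulates - the opposite of A.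
import Mathlib
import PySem

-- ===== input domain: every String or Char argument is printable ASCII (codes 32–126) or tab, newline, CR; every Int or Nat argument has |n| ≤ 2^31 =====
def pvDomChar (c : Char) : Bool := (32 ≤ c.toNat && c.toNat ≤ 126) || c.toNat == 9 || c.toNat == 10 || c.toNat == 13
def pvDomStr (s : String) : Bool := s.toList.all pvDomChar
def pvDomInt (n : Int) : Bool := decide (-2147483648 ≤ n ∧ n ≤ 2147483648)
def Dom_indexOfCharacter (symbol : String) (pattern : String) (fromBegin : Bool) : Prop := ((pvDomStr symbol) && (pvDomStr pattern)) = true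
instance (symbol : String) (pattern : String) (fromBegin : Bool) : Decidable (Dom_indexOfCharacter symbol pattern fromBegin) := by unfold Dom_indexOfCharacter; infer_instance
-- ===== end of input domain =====

-- B replaces A's left-to-right depth scan (remembering the last match) by a right-to-left
-- scan against the precomputed total balance (alternative traversal order, same cost).

-- ===== PORT A =====
-- A's loop: running flag (updated by two sequential ifs), `index` holds the last match, early return on a match when fromBegin.
def idxA_go (symbol : List Char) (cs : List Char) (i : Int) (flag : Int) (index : Int) (fromBegin : Bool) : Int :=
  match cs with
  | [] => index
  | c :: rest =>
    let flag1 := if c = '(' then flag + 1 else flag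
    let flag2 := if c = ')' then flag1 - 1 else flag1
    if [c] = symbol ∧ flag2 = 0 then
      if fromBegin then i
      else idxA_go symbol rest (i + 1) flag2 i fromBegin
    else idxA_go symbol rest (i + 1) flag2 index fromBegin

def indexOfCharacter (symbol : String) (pattern : String) (fromBegin : Bool) : Int :=
  idxA_go symbol.toList pattern.toList 0 0 (-1) fromBegin

-- ===== PORT B =====
-- B's loop over range(len-1, -1, -1): check (c == symbol and suffix == total) BEFORE updating suffix.
def idxB_go (symbol : List Char) (cs : List Char) (i : Int) (suffix : Int) (total : Int) (index : Int) (fromBegin : Bool) : Int :=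
  match cs with
  | [] => index
  | c :: rest =>
    if [c] = symbol ∧ suffix = total then
      if !fromBegin then i
      else idxB_go symbol rest (i - 1)
        (if c = '(' then suffix + 1 else if c = ')' then suffix - 1 else suffix) total i fromBegin
    else idxB_go symbol rest (i - 1)
      (if c = '(' then suffix + 1 else if c = ')' then suffix - 1 else suffix) total index fromBegin

def indexOfCharacter_alt (symbol : String) (pattern : String) (fromBegin : Bool) : Int :=
  let total : Int := (pattern.toList.map
    (fun c => if c = '(' then (1 : Int) else if c = ')' then -1 else 0)).sum
  idxB_go symbol.toList pattern.toList.reverse ((pattern.toList.length : Int) - 1) 0 total (-1) fromBegin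

-- ===== PRECONDITION & SPEC =====
def Spec_indexOfCharacter (symbol : String) (pattern : String) (fromBegin : Bool) (out : Int) : Prop := out = indexOfCharacter_alt symbol pattern fromBegin
instance (symbol : String) (pattern : String) (fromBegin : Bool) (out : Int) : Decidable (Spec_indexOfCharacter symbol pattern fromBegin out) := by unfold Spec_indexOfCharacter; infer_instance

-- ===== CLAIM (what is proved, stated in full; the proofs are below) =====
def Claim_equal_indexOfCharacter : Prop := ∀ (symbol : String) (pattern : String) (fromBegin : Bool), Dom_indexOfCharacter symbol pattern fromBegin → Spec_indexOfCharacter symbol pattern fromBegin (indexOfCharacter symbol pattern fromBegin)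

-- ===== LEMMAS AND PROOFS =====

def pvDelta (c : Char) : Int := if c = '(' then 1 else if c = ')' then -1 else 0

def pvDsum (l : List Char) : Int := (l.map pvDelta).sum

-- depth AFTER each character, starting from p
def pvDepths (cs : List Char) (d : Int) : List Int :=
  match cs with
  | [] => []
  | c :: rest => (d + pvDelta c) :: pvDepths rest (d + pvDelta c)

-- forward match list: indices i with pattern[i] = symbol and depth-after-i = 0
def pvMatches (symbol : List Char) (cs : List Char) (ds : List Int) (i : Int) : List Int :=
  match cs, ds with
  | c :: rest, d :: drest =>
    if [c] = symbol ∧ d = 0 then i :: pvMatches symbol rest drest (i + 1)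
    else pvMatches symbol rest drest (i + 1)
  | _, _ => []

-- reverse match list: indices i (descending) with char = symbol and running suffix = T
def pvMatchesR (symbol : List Char) (cs : List Char) (i : Int) (s : Int) (T : Int) : List Int :=
  match cs with
  | [] => []
  | c :: rest =>
    if [c] = symbol ∧ s = T then i :: pvMatchesR symbol rest (i - 1) (s + pvDelta c) T
    else pvMatchesR symbol rest (i - 1) (s + pvDelta c) T

theorem pvGetLastD_cons (l : List Int) : ∀ (a d : Int), ((a :: l).getLast?).getD d = (l.getLast?).getD a := by
  induction l with
  | nil => intro a d; simp
  | cons b t ih => intro a d; rw [List.getLast?_cons_cons, ih b d, ih b a]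

-- A's fused scan = head (fromBegin) / last (otherwise) of the forward match list, defaulting to `index`.
theorem idxA_go_eq (symbol cs : List Char) (i flag index : Int) (fromBegin : Bool) :
    idxA_go symbol cs i flag index fromBegin =
      (let ms := pvMatches symbol cs (pvDepths cs flag) i
       if fromBegin then ms.headD index else ms.getLastD index) := by
  induction cs generalizing i flag index with
  | nil => simp [idxA_go, pvDepths, pvMatches]
  | cons c rest ih =>
    simp only [idxA_go, pvDepths, pvMatches]
    have hflag : (if c = ')' then (if c = '(' then flag + 1 else flag) - 1
                  else (if c = '(' then flag + 1 else flag)) = flag + pvDelta c := by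
      by_cases h1 : c = '(' <;> by_cases h2 : c = ')' <;> simp_all [pvDelta] <;> omega
    simp only [hflag]
    by_cases hm : [c] = symbol ∧ flag + pvDelta c = 0
    · simp only [hm, if_pos]
      cases fromBegin with
      | true => simp
      | false =>
        simp only [ih]
        simp only [Bool.false_eq_true, if_false, List.getLastD_eq_getLast?]
        exact (pvGetLastD_cons _ i index).symm
    · simp only [hm, if_neg, ih]
      simp [hm]

-- B's reverse scan = head (not fromBegin) / last (fromBegin) of the reverse match list.
theorem idxB_go_eq (symbol cs : List Char) (i s T index : Int) (fromBegin : Bool) :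
    idxB_go symbol cs i s T index fromBegin =
      (let ms := pvMatchesR symbol cs i s T
       if fromBegin then ms.getLastD index else ms.headD index) := by
  induction cs generalizing i s index with
  | nil => simp [idxB_go, pvMatchesR]
  | cons c rest ih =>
    simp only [idxB_go, pvMatchesR]
    have hupd : (if c = '(' then s + 1 else if c = ')' then s - 1 else s) = s + pvDelta c := by
      by_cases h1 : c = '(' <;> by_cases h2 : c = ')' <;> simp_all [pvDelta] <;> omega
    simp only [hupd]
    by_cases hm : [c] = symbol ∧ s = T
    · simp only [hm, if_pos]
      cases fromBegin with
      | false => simp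
      | true =>
        simp only [ih]
        simp only [Bool.not_true, Bool.false_eq_true, if_false, List.getLastD_eq_getLast?]
        exact (pvGetLastD_cons _ i index).symm
    · simp only [hm, if_neg, ih]
      simp [hm]

theorem pvMatchesR_app (symbol : List Char) (T : Int) :
    ∀ (xs ys : List Char) (i s : Int),
      pvMatchesR symbol (xs ++ ys) i s T =
        pvMatchesR symbol xs i s T ++ pvMatchesR symbol ys (i - xs.length) (s + pvDsum xs) T := by
  intro xs
  induction xs with
  | nil => intro ys i s; simp [pvMatchesR, pvDsum]
  | cons c rest ih =>
    intro ys i s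
    have e1 : i - 1 - (rest.length : Int) = i - ((c :: rest).length : Int) := by
      push_cast [List.length_cons]; ring
    have e2 : s + pvDelta c + pvDsum rest = s + pvDsum (c :: rest) := by
      simp only [pvDsum, List.map_cons, List.sum_cons]; ring
    simp only [List.cons_append, pvMatchesR]
    by_cases hm : [c] = symbol ∧ s = T
    · rw [if_pos hm, if_pos hm, ih, e1, e2, List.cons_append]
    · rw [if_neg hm, if_neg hm, ih, e1, e2]

-- key: the reverse match list on the reversed pattern is the reverse of the forward match list
theorem pvMatchesR_reverse (symbol : List Char) :
    ∀ (l : List Char) (i p : Int),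
      (pvMatches symbol l (pvDepths l p) i).reverse =
        pvMatchesR symbol l.reverse (i + (l.length : Int) - 1) 0 (p + pvDsum l) := by
  intro l
  induction l with
  | nil => intro i p; simp [pvMatches, pvDepths, pvMatchesR]
  | cons c rest ih =>
    intro i p
    simp only [pvMatches, pvDepths, List.reverse_cons]
    have hT : p + pvDsum (c :: rest) = p + pvDelta c + pvDsum rest := by
      simp only [pvDsum, List.map_cons, List.sum_cons]; ring
    have hidx : i + ((c :: rest).length : Int) - 1 = i + 1 + (rest.length : Int) - 1 := by
      push_cast [List.length_cons]; ring
    have hs : (0 : Int) + pvDsum rest.reverse = pvDsum rest := by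
      simp [pvDsum, List.sum_reverse]
    have hlast : i + 1 + (rest.length : Int) - 1 - (rest.reverse.length : Int) = i := by
      push_cast [List.length_reverse]; ring
    rw [pvMatchesR_app, hT, hidx, hlast, hs, ← ih]
    by_cases hm : [c] = symbol ∧ p + pvDelta c = 0
    · have hc : pvDsum rest = p + pvDelta c + pvDsum rest := by
        have := hm.2; linarith
      have h1 : pvMatchesR symbol [c] i (pvDsum rest) (p + pvDelta c + pvDsum rest) = [i] := by
        unfold pvMatchesR
        rw [if_pos ⟨hm.1, hc⟩]
        rfl
      rw [if_pos hm, h1, List.reverse_cons]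
    · have hc : ¬ ([c] = symbol ∧ pvDsum rest = p + pvDelta c + pvDsum rest) := by
        rintro ⟨ha, hb⟩; exact hm ⟨ha, by linarith⟩
      have h1 : pvMatchesR symbol [c] i (pvDsum rest) (p + pvDelta c + pvDsum rest) = [] := by
        unfold pvMatchesR
        rw [if_neg hc]
        rfl
      rw [if_neg hm, h1, List.append_nil]

theorem pvTotal_eq (l : List Char) :
    (l.map (fun c => if c = '(' then (1 : Int) else if c = ')' then -1 else 0)).sum = pvDsum l := rfl

theorem indexOfCharacter_spec' (symbol pattern : String) (fromBegin : Bool) :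
    indexOfCharacter symbol pattern fromBegin = indexOfCharacter_alt symbol pattern fromBegin := by
  unfold indexOfCharacter indexOfCharacter_alt
  rw [idxA_go_eq, idxB_go_eq, pvTotal_eq]
  have hR := pvMatchesR_reverse symbol.toList pattern.toList 0 0
  simp only [zero_add] at hR
  rw [← hR]
  cases fromBegin <;>
    simp [List.getLastD_eq_getLast?, List.getLast?_reverse, List.head?_reverse]

-- ===== VERDICT (by name: the statement is the Claim_ definition above) =====
theorem indexOfCharacter_spec : Claim_equal_indexOfCharacter := by
  intro symbol pattern fromBegin _
  unfold Spec_indexOfCharacter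
  exact indexOfCharacter_spec' symbol pattern fromBegin
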